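-- pv_equiv track=rewrite | github.com/rickyurvinaunab/INTRO_11285 | clases/listas_de_listas/p8_dccumpleanos.py | buscar_sin_respuesta
-- ===== SOURCE A (Python) =====
-- def buscar_sin_respuesta(invitados, confirmaciones):
--     asistentes = []
--     # Se crea una lista vacia donde se guardaran los invitados que no han respondido
--     for invitado in invitados:
--         # Se recorre cada nombre en la lista de invitados
--         ultima_resp = ""
--         # Se inicializa una variable para guardar la ultima respuesta encontrada del invitado
--         # Si no se encuentra ninguna, se mantendra como cadena vacia
--         for confirmacion in confirmaciones:
--             # Se recorre cada elemento de la lista de confirmaciones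
--             # Cada confirmacion es una lista con dos elementos: [nombre, respuesta]
--             if invitado == confirmacion[0]:
--                 # Si el nombre del invitado coincide con el de la confirmacion...
--                 ultima_resp = confirmacion[1]
--                 # se actualiza 'ultima_resp' con la respuesta correspondiente
--         if ultima_resp == "":
--             # Si despues de revisar todas las confirmaciones, no se encontro ninguna respuesta...
--             asistentes.append(invitado)
--             # se agrega ese invitado a la lista de asistentes sin respuesta
--     return asistentes
-- ===== SOURCE B (Python) =====
-- def buscar_sin_respuesta(invitados, confirmaciones):
--     pendientes = set(invitados)
--     ultima = {}
--     for confirmacion in confirmaciones: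
--         if confirmacion[0] in pendientes:
--             ultima[confirmacion[0]] = confirmacion[1]
--     return [invitado for invitado in invitados if ultima.get(invitado, "") == ""]
-- ===== Notes on version B (the rewrite author's own statement) =====
-- stated objective: faster
-- what changed: Replaces the nested scan (for each guest, rescan all confirmations) by one pass over the confirmations building a dict name->last response for invited names, then a single filter over the guests.
-- outside the precondition, e.g. on buscar_sin_respuesta([], [[]]): A returns [], B raises IndexError
import Mathlib
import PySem

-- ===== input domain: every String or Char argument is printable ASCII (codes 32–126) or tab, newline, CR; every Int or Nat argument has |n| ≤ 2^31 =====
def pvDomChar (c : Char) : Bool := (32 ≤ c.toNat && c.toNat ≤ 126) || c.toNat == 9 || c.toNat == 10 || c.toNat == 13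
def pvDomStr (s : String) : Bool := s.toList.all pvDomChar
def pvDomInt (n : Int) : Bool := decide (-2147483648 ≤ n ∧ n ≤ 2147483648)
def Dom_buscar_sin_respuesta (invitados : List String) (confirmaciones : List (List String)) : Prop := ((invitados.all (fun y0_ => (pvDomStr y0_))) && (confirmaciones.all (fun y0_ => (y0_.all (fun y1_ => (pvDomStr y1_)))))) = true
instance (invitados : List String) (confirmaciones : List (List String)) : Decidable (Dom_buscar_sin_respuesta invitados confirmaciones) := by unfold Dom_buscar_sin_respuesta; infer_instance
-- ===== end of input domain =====

-- B replaces A's nested scan (for each guest, rescan all confirmations) by one pass building a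
-- dict name -> last response for invited names, then a single filter over the guests (faster, asymptotic).
-- Pre_ excludes empty confirmation rows and one-field rows naming an invited guest: A raises
-- IndexError on them whenever it inspects them (any nonempty guest list), and B, which indexes
-- every row once, raises on an empty row even in the degenerate case of an empty guest list,
-- where A returns [] without ever reading the rows.

-- ===== PORT A =====
def buscar_sin_respuesta (invitados : List String) (confirmaciones : List (List String)) : List String :=
  invitados.foldl (fun asistentes invitado =>
    let ultima_resp := confirmaciones.foldl (fun ultima_resp confirmacion =>
      if invitado == (PySem.List.pyGet? confirmacion 0).getD "" then
        (PySem.List.pyGet? confirmacion 1).getD ""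
      else ultima_resp) ""
    if ultima_resp == "" then asistentes ++ [invitado] else asistentes) []

-- ===== PORT B =====
def buscar_sin_respuesta_alt (invitados : List String) (confirmaciones : List (List String)) : List String :=
  let pendientes : PySem.Set String := PySem.Set.ofList invitados
  let ultima : PySem.Dict String String := confirmaciones.foldl (fun d confirmacion =>
      if PySem.Set.contains pendientes ((PySem.List.pyGet? confirmacion 0).getD "") then
        d.insert ((PySem.List.pyGet? confirmacion 0).getD "") ((PySem.List.pyGet? confirmacion 1).getD "")
      else d) PySem.Dict.empty
  invitados.filter (fun invitado => ultima.getD invitado "" == "")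

-- ===== PRECONDITION & SPEC =====
-- Pre_ excludes empty rows and one-field rows naming an invited guest (see the header line above).
def Pre_buscar_sin_respuesta (invitados : List String) (confirmaciones : List (List String)) : Prop :=
  ∀ c ∈ confirmaciones, c ≠ [] ∧ (c.headD "" ∈ invitados → 2 ≤ c.length)
instance (invitados : List String) (confirmaciones : List (List String)) : Decidable (Pre_buscar_sin_respuesta invitados confirmaciones) := by unfold Pre_buscar_sin_respuesta; infer_instance

def pvWitness_buscar_sin_respuesta : List String × List (List String) :=
  (["ana", "beto", "carla"], [["ana", "si"], ["beto", ""], ["ana", ""]])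

def Spec_buscar_sin_respuesta (invitados : List String) (confirmaciones : List (List String)) (out : List String) : Prop := out = buscar_sin_respuesta_alt invitados confirmaciones
instance (invitados : List String) (confirmaciones : List (List String)) (out : List String) : Decidable (Spec_buscar_sin_respuesta invitados confirmaciones out) := by unfold Spec_buscar_sin_respuesta; infer_instance

-- ===== CLAIM (what is proved, stated in full; the proofs are below) =====
def Claim_equal_buscar_sin_respuesta : Prop := ∀ (invitados : List String) (confirmaciones : List (List String)), Dom_buscar_sin_respuesta invitados confirmaciones → Pre_buscar_sin_respuesta invitados confirmaciones → Spec_buscar_sin_respuesta invitados confirmaciones (buscar_sin_respuesta invitados confirmaciones)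

-- ===== LEMMAS AND PROOFS =====

-- the looked-up value of B's dict after the one pass equals A's inner fold, for any guest in the set
theorem pv_dict_eq_inner (confs : List (List String)) (s : PySem.Set String)
    (d : PySem.Dict String String) (g : String) (hg : PySem.Set.contains s g = true) :
    (confs.foldl (fun d c =>
        if PySem.Set.contains s ((PySem.List.pyGet? c 0).getD "") then
          d.insert ((PySem.List.pyGet? c 0).getD "") ((PySem.List.pyGet? c 1).getD "")
        else d) d).getD g "" =
    confs.foldl (fun u c =>
        if g == (PySem.List.pyGet? c 0).getD "" then (PySem.List.pyGet? c 1).getD "" else u)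
      (d.getD g "") := by
  induction confs generalizing d with
  | nil => rfl
  | cons c rest ih =>
    simp only [List.foldl_cons]
    by_cases h : (PySem.List.pyGet? c 0).getD "" = g
    · subst h
      rw [hg]
      simp only [beq_self_eq_true, if_true]
      rw [ih, PySem.Dict.getD_insert_self]
    · have hne : (g == (PySem.List.pyGet? c 0).getD "") = false := by
        simp [beq_eq_false_iff_ne]; exact fun e => h e.symm
      rw [hne]
      simp only [Bool.false_eq_true, if_false]
      by_cases hc : PySem.Set.contains s ((PySem.List.pyGet? c 0).getD "") = true
      · rw [hc]
        simp only [if_true]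
        rw [ih, PySem.Dict.getD_insert_of_ne _ _ _ (fun e => h e.symm)]
      · simp only [hc]
        exact ih d

-- ===== VERDICT (by name: the statement is the Claim_ definition above) =====
theorem buscar_sin_respuesta_spec : Claim_equal_buscar_sin_respuesta := by
  intro invitados confirmaciones _ _
  unfold Spec_buscar_sin_respuesta buscar_sin_respuesta buscar_sin_respuesta_alt
  rw [PySem.List.foldl_append_if_eq_filter]
  simp only [List.nil_append]
  apply List.filter_congr
  intro g hg
  rw [pv_dict_eq_inner confirmaciones (PySem.Set.ofList invitados) PySem.Dict.empty g
    (by rw [PySem.Set.contains_iff]; simpa [PySem.Set.mem_ofList] using hg)]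
  rfl
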